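-- pv_equiv track=rewrite | github.com/Deepak-Leveledge/DSA-preparations | String/Two-pointer/Reverse-string-with-space.py | reversethestringwithoutloosingposition
-- ===== SOURCE A (Python) =====
-- def reversethestringwithoutloosingposition(str):
--     str =list(str)
--     start=0
--     end=len(str)-1
--     while start<end:
--         if str[start]==' ':
--             start+=1
--         elif str[end]==' ':
--             end-=1
--         else:
--             str[start],str[end]=str[end],str[start]
--             start+=1
--             end-=1
--     return "".join(str)
-- ===== SOURCE B (Python) =====
-- def reversethestringwithoutloosingposition(str):
--     rev = [c for c in str if c != ' ']
--     rev.reverse()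
--     out = []
--     j = 0
--     for c in str:
--         if c == ' ':
--             out.append(' ')
--         else:
--             out.append(rev[j])
--             j += 1
--     return "".join(out)
-- ===== Notes on version B (the rewrite author's own statement) =====
-- stated objective: simpler
-- what changed: Replaces the in-place two-pointer inward swap with two forward passes: collect the non-space characters, reverse that list once, then rebuild the string left-to-right keeping spaces and consuming the reversed list elsewhere.
import Mathlib
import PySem

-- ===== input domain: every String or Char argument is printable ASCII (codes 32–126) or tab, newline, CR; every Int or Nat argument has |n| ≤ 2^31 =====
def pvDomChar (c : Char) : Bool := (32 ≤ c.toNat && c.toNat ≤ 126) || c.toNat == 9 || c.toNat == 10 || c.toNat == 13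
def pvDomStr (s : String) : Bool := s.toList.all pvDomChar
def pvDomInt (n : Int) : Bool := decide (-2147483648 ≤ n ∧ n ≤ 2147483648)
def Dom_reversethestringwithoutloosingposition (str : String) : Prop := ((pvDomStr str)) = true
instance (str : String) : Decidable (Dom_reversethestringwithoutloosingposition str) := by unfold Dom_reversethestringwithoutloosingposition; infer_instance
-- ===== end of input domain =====

-- B replaces A's in-place two-pointer inward swap by two forward passes (collect the
-- non-space characters, reverse them once, rebuild left to right); same O(n) cost, simpler.

-- ===== PORT A =====
-- A's while loop. Indices are Nat: start is only ever incremented from 0, and for the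
-- empty string Python's end = -1 makes the guard 0 < -1 false exactly as Nat's 0 < 0 here.
-- Every str[start]/str[end] access happens only when 0 ≤ start < end < len, so the
-- `getD _ ' '` default is never used and the port is exact; the simultaneous swap reads
-- both cells before writing (start ≠ end).
-- The loop is totalised with a fuel argument (structural recursion): every iteration
-- strictly decreases end - start, which starts below the list's length, so fuel =
-- length is always sufficient and the fuel branch is never the one that stops the loop.
def pvLoopA : Nat → List Char → Nat → Nat → List Char
  | 0, l, _, _ => l
  | fuel + 1, l, s, e =>
    if s < e then
      if l.getD s ' ' = ' ' then pvLoopA fuel l (s + 1) e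
      else if l.getD e ' ' = ' ' then pvLoopA fuel l s (e - 1)
      else pvLoopA fuel ((l.set s (l.getD e ' ')).set e (l.getD s ' ')) (s + 1) (e - 1)
    else l

def reversethestringwithoutloosingposition (str : String) : String :=
  String.mk (pvLoopA str.toList.length str.toList 0 (str.toList.length - 1))

-- ===== PORT B =====
-- `pvFill rest q` is B's for-loop with the cursor j into rev replaced by consuming the
-- head of the remaining queue q (rev[j] = q.headD; j += 1 = q.tail). The queue holds
-- exactly one entry per remaining non-space character, so the `headD ' '` default is
-- never used and the port is exact.
def pvFill : List Char → List Char → List Char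
  | [], _ => []
  | c :: rest, q =>
      if c = ' ' then ' ' :: pvFill rest q
      else q.headD ' ' :: pvFill rest q.tail

def reversethestringwithoutloosingposition_alt (str : String) : String :=
  String.mk (pvFill str.toList ((str.toList.filter (fun c => !(c == ' '))).reverse))

-- ===== PRECONDITION & SPEC =====
def Spec_reversethestringwithoutloosingposition (str : String) (out : String) : Prop := out = reversethestringwithoutloosingposition_alt str
instance (str : String) (out : String) : Decidable (Spec_reversethestringwithoutloosingposition str out) := by unfold Spec_reversethestringwithoutloosingposition; infer_instance

-- ===== CLAIM (what is proved, stated in full; the proofs are below) =====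
def Claim_equal_reversethestringwithoutloosingposition : Prop := ∀ (str : String), Dom_reversethestringwithoutloosingposition str → Spec_reversethestringwithoutloosingposition str (reversethestringwithoutloosingposition str)

-- ===== LEMMAS AND PROOFS =====

-- the non-space characters of a list
def pvNS (l : List Char) : List Char := l.filter (fun c => !(c == ' '))

-- B's whole computation on a char list
def pvSPR (l : List Char) : List Char := pvFill l (pvNS l).reverse

theorem pvNS_cons (c : Char) (l : List Char) :
    pvNS (c :: l) = if c = ' ' then pvNS l else c :: pvNS l := by
  by_cases h : c = ' ' <;> simp [pvNS, h]

theorem pvGetD_append_len (P R : List Char) (x d : Char) :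
    (P ++ x :: R).getD P.length d = x := by
  induction P with
  | nil => rfl
  | cons p P ih => simpa using ih

theorem pvSet_append_len (P R : List Char) (x y : Char) :
    (P ++ x :: R).set P.length y = P ++ y :: R := by
  induction P with
  | nil => rfl
  | cons p P ih => simpa using ih

theorem pvFill_append (m₁ m₂ q : List Char) :
    pvFill (m₁ ++ m₂) q = pvFill m₁ q ++ pvFill m₂ (q.drop (pvNS m₁).length) := by
  induction m₁ generalizing q with
  | nil => simp [pvFill, pvNS]
  | cons c rest ih =>
      by_cases h : c = ' '
      · simp [pvFill, h, ih, pvNS_cons]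
      · simp [pvFill, h, ih, pvNS_cons]

theorem pvFill_prefix (m q r : List Char) (h : (pvNS m).length ≤ q.length) :
    pvFill m (q ++ r) = pvFill m q := by
  induction m generalizing q with
  | nil => simp [pvFill]
  | cons c rest ih =>
      by_cases hc : c = ' '
      · simp only [pvFill, if_pos hc]
        rw [ih]
        simpa [pvNS_cons, hc] using h
      · rw [pvNS_cons, if_neg hc] at h
        cases q with
        | nil => simp at h
        | cons x q' =>
            simp only [pvFill, if_neg hc, List.cons_append, List.headD, List.tail]
            rw [ih]
            simpa using h

theorem pvSPR_nil : pvSPR [] = [] := rfl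

theorem pvSPR_single (c : Char) : pvSPR [c] = [c] := by
  by_cases h : c = ' ' <;> simp [pvSPR, pvNS, pvFill, h]

theorem pvSPR_cons_space (m : List Char) : pvSPR (' ' :: m) = ' ' :: pvSPR m := by
  simp [pvSPR, pvNS_cons, pvFill]

theorem pvSPR_concat_space (m : List Char) : pvSPR (m ++ [' ']) = pvSPR m ++ [' '] := by
  have hns : pvNS (m ++ [' ']) = pvNS m := by simp [pvNS]
  simp [pvSPR, hns, pvFill_append, pvFill]

theorem pvSPR_swap (a b : Char) (mid : List Char) (ha : a ≠ ' ') (hb : b ≠ ' ') :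
    pvSPR (a :: (mid ++ [b])) = b :: (pvSPR mid ++ [a]) := by
  have hns : pvNS (a :: (mid ++ [b])) = a :: (pvNS mid ++ [b]) := by
    simp [ha, hb, pvNS]
  have hrev : (a :: (pvNS mid ++ [b])).reverse = b :: ((pvNS mid).reverse ++ [a]) := by simp
  rw [pvSPR, hns, hrev]
  simp only [pvFill, if_neg ha, List.headD, List.tail]
  rw [pvFill_append]
  rw [pvFill_prefix mid _ [a] (by simp)]
  have hd : ((pvNS mid).reverse ++ [a]).drop (pvNS mid).length = [a] := by
    rw [show (pvNS mid).length = (pvNS mid).reverse.length by simp]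
    exact List.drop_left
  rw [hd]
  simp [pvFill, hb, pvSPR]

theorem pvLoopA_core (fuel : Nat) (seg P S : List Char) (hf : seg.length ≤ fuel + 1) :
    pvLoopA fuel (P ++ seg ++ S) P.length (P.length + seg.length - 1) = P ++ pvSPR seg ++ S := by
  induction fuel generalizing seg P S with
  | zero =>
      match seg, hf with
      | [], _ => simp [pvLoopA, pvSPR_nil]
      | [a], _ => simp [pvLoopA, pvSPR_single]
      | a :: b :: t, hf => simp at hf
  | succ fuel ih =>
      match seg, hf with
      | [], _ =>
          rw [pvLoopA]
          simp [pvSPR_nil]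
      | [a], _ =>
          rw [pvLoopA]
          simp [pvSPR_single]
      | a :: t, hf =>
          rcases t.eq_nil_or_concat with rfl | ⟨mid, b, rfl⟩
          · rw [pvLoopA]
            simp [pvSPR_single]
          · simp only [List.concat_eq_append] at hf ⊢
            have hf' : mid.length + 2 ≤ fuel + 2 := by
              simp only [List.length_cons, List.length_append, List.length_nil] at hf
              omega
            have hguard : P.length < P.length + (a :: (mid ++ [b])).length - 1 := by
              simp only [List.length_cons, List.length_append, List.length_nil]
              omega
            have hlist : P ++ (a :: (mid ++ [b])) ++ S = P ++ a :: (mid ++ b :: S) := by simp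
            have hgetS : (P ++ a :: (mid ++ b :: S)).getD P.length ' ' = a :=
              pvGetD_append_len _ _ _ _
            have hgetE : (P ++ a :: (mid ++ b :: S)).getD
                (P.length + (a :: (mid ++ [b])).length - 1) ' ' = b := by
              have hidx : P.length + (a :: (mid ++ [b])).length - 1 = (P ++ a :: mid).length := by
                simp only [List.length_cons, List.length_append, List.length_nil]
                omega
              rw [show P ++ a :: (mid ++ b :: S) = (P ++ a :: mid) ++ b :: S by simp, hidx]
              exact pvGetD_append_len _ _ _ _
            rw [pvLoopA, hlist, if_pos hguard]
            by_cases hA : a = ' '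
            · rw [if_pos (by rw [hgetS]; exact hA)]
              have h1 : P ++ a :: (mid ++ b :: S) = (P ++ [a]) ++ (mid ++ [b]) ++ S := by simp
              have h3 : P.length + (a :: (mid ++ [b])).length - 1
                  = (P ++ [a]).length + (mid ++ [b]).length - 1 := by
                simp only [List.length_cons, List.length_append, List.length_nil]
                omega
              have h2 : P.length + 1 = (P ++ [a]).length := by simp
              rw [h1, h3, h2, ih (mid ++ [b]) (P ++ [a]) S (by simp; omega)]
              subst hA
              simp [pvSPR_cons_space]
            · rw [if_neg (by rw [hgetS]; exact hA)]
              by_cases hB : b = ' '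
              · rw [if_pos (by rw [hgetE]; exact hB)]
                have h1 : P ++ a :: (mid ++ b :: S) = P ++ (a :: mid) ++ (b :: S) := by simp
                have h3 : P.length + (a :: (mid ++ [b])).length - 1 - 1
                    = P.length + (a :: mid).length - 1 := by
                  simp only [List.length_cons, List.length_append, List.length_nil]
                  omega
                rw [h1, h3, ih (a :: mid) P (b :: S) (by simp; omega)]
                subst hB
                have h4 := pvSPR_concat_space (a :: mid)
                simp only [List.cons_append] at h4
                rw [h4]
                simp
              · rw [if_neg (by rw [hgetE]; exact hB)]
                rw [hgetS, hgetE]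
                have hset1 : (P ++ a :: (mid ++ b :: S)).set P.length b
                    = P ++ b :: (mid ++ b :: S) := pvSet_append_len _ _ _ _
                have hset2 : (P ++ b :: (mid ++ b :: S)).set
                    (P.length + (a :: (mid ++ [b])).length - 1) a
                    = P ++ b :: (mid ++ a :: S) := by
                  have hidx : P.length + (a :: (mid ++ [b])).length - 1
                      = (P ++ b :: mid).length := by
                    simp only [List.length_cons, List.length_append, List.length_nil]
                    omega
                  rw [show P ++ b :: (mid ++ b :: S) = (P ++ b :: mid) ++ b :: S by simp, hidx,
                    pvSet_append_len]
                  simp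
                rw [hset1, hset2]
                have h1 : P ++ b :: (mid ++ a :: S) = (P ++ [b]) ++ mid ++ (a :: S) := by simp
                have h3 : P.length + (a :: (mid ++ [b])).length - 1 - 1
                    = (P ++ [b]).length + mid.length - 1 := by
                  simp only [List.length_cons, List.length_append, List.length_nil]
                  omega
                have h2 : P.length + 1 = (P ++ [b]).length := by simp
                rw [h1, h3, h2, ih mid (P ++ [b]) (a :: S) (by omega)]
                rw [pvSPR_swap a b mid hA hB]
                simp

theorem pvLoopA_eq_pvSPR (l : List Char) :
    pvLoopA l.length l 0 (l.length - 1) = pvSPR l := by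
  have := pvLoopA_core l.length l [] [] (by omega)
  simpa using this

-- ===== VERDICT (by name: the statement is the Claim_ definition above) =====
theorem reversethestringwithoutloosingposition_spec : Claim_equal_reversethestringwithoutloosingposition := by
  intro str _
  unfold Spec_reversethestringwithoutloosingposition
  unfold reversethestringwithoutloosingposition reversethestringwithoutloosingposition_alt
  rw [pvLoopA_eq_pvSPR]
  rfl
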